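-- pv_equiv track=rewrite | github.com/stneng/cs265-bril | examples/task2/dataflow.py | constant_meet
-- ===== SOURCE A (Python) =====
-- def constant_meet(lists):
--     ans = {}
--     vars = set()
--     for x in lists:
--         vars = vars.union(set(x.keys()))
--     vars = list(vars)
--     for var in vars:
--         meet = True
--         for x in lists:
--             if var not in x:
--                 meet = False
--                 break
--             else:
--                 if x[var] != lists[0][var]:
--                     meet = False
--                     break
--         if meet:
--             ans[var] = lists[0][var]
--     return ans
-- ===== SOURCE B (Python) =====
-- def constant_meet(lists):
--     if not lists:
--         return {}
--     first = lists[0]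
--     rest = lists[1:]
--     return {var: val for var, val in first.items()
--             if all(x.get(var) == val for x in rest)}
-- ===== Notes on version B (the rewrite author's own statement) =====
-- stated objective: faster
-- what changed: B drops A's var-set union and per-var rescans of all dicts: it filters the first dict's items directly, keeping an entry iff every remaining dict maps the var to the same value.
import Mathlib
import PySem

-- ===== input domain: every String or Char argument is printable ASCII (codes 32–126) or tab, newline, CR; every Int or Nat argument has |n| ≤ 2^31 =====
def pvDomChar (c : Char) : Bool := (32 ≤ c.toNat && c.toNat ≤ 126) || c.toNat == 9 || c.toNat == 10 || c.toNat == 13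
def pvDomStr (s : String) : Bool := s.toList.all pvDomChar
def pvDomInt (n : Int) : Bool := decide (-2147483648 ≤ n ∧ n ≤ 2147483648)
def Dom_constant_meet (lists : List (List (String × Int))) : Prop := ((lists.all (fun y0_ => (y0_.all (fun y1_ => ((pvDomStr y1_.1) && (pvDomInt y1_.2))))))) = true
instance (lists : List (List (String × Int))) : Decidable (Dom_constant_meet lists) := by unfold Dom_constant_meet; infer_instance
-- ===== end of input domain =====

-- B replaces A's var-set union plus per-var rescans by a single filter over the first
-- dict's items, keeping an entry iff every remaining dict maps its var to the same value.
-- Output is a Python dict; A's Python iterates a set, so the output's (immaterial) key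
-- order is ported as first-insertion order.

-- x[k] / 'k in x' on a dict represented as an association list: value of the first matching key
def aGet? (x : List (String × Int)) (k : String) : Option Int :=
  (x.find? (fun p => p.1 == k)).map (fun p => p.2)

-- ===== PORT A =====
def constant_meet (lists : List (List (String × Int))) : List (String × Int) :=
  let vars : PySem.Set String :=
    lists.foldl (fun vs x => PySem.Set.union vs (PySem.Set.ofList (x.map (fun p => p.1)))) PySem.Set.empty
  vars.foldl (fun ans var =>
    let meet := lists.all (fun x =>
      match aGet? x var with
      | none => false
      | some v => v == (aGet? (lists.headD []) var).getD 0)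
    if meet then ans ++ [(var, (aGet? (lists.headD []) var).getD 0)] else ans) []

-- ===== PORT B =====
def constant_meet_alt (lists : List (List (String × Int))) : List (String × Int) :=
  match lists with
  | [] => []
  | first :: rest => first.filter (fun p => rest.all (fun x => aGet? x p.1 == some p.2))

-- ===== PRECONDITION & SPEC =====
-- Pre_ only states the dict-representation invariant (each inner association list has
-- distinct keys); every Python input (a list of dicts) satisfies it, so nothing A
-- returns on is excluded.
def Pre_constant_meet (lists : List (List (String × Int))) : Prop :=
  ∀ x ∈ lists, (x.map (fun p => p.1)).Nodup
instance (lists : List (List (String × Int))) : Decidable (Pre_constant_meet lists) := by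
  unfold Pre_constant_meet; infer_instance

def pvWitness_constant_meet : (List (List (String × Int))) :=
  [[("x", 1), ("y", 2)], [("y", 2), ("x", 3)]]

def Spec_constant_meet (lists : List (List (String × Int))) (out : List (String × Int)) : Prop := out = constant_meet_alt lists
instance (lists : List (List (String × Int))) (out : List (String × Int)) : Decidable (Spec_constant_meet lists out) := by unfold Spec_constant_meet; infer_instance

-- ===== CLAIM (what is proved, stated in full; the proofs are below) =====
def Claim_equal_constant_meet : Prop := ∀ (lists : List (List (String × Int))), Dom_constant_meet lists → Pre_constant_meet lists → Spec_constant_meet lists (constant_meet lists)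

-- ===== LEMMAS AND PROOFS =====

-- adding an already-deduplicated list is the same as adding the list
theorem set_update_ofList (s : PySem.Set String) (t : List String) :
    PySem.Set.update s (PySem.Set.ofList t) = PySem.Set.update s t := by
  rw [PySem.Set.update_eq_append_filter, PySem.Set.update_eq_append_filter,
    PySem.Set.ofList_ofList]

-- A's union loop collects the keys of all dicts, first occurrences in order
theorem foldl_union_eq_update (L : List (List (String × Int))) (s : PySem.Set String) :
    L.foldl (fun vs x => PySem.Set.union vs (PySem.Set.ofList (x.map (fun p => p.1)))) s
      = PySem.Set.update s (L.flatMap (fun x => x.map (fun p => p.1))) := by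
  induction L generalizing s with
  | nil => simp [PySem.Set.update]
  | cons x L ih =>
    simp only [List.foldl_cons, List.flatMap_cons, PySem.Set.update_append, ih]
    rw [PySem.Set.union, set_update_ofList]

-- first-match lookup in a duplicate-free association list finds the pair itself
theorem find?_of_nodup_keys (l : List (String × Int)) (p : String × Int)
    (hnd : (l.map (fun q => q.1)).Nodup) (hp : p ∈ l) :
    l.find? (fun q => q.1 == p.1) = some p := by
  induction l with
  | nil => simp at hp
  | cons q l ih =>
    simp only [List.map_cons, List.nodup_cons] at hnd
    rcases List.mem_cons.mp hp with h | h
    · subst h; simp [List.find?]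
    · have hne : (q.1 == p.1) = false := by
        simp only [beq_eq_false_iff_ne, ne_eq]
        intro hq
        exact hnd.1 (hq ▸ List.mem_map_of_mem h)
      simp [List.find?, hne, ih hnd.2 h]

theorem aGet?_of_nodup (l : List (String × Int)) (p : String × Int)
    (hnd : (l.map (fun q => q.1)).Nodup) (hp : p ∈ l) :
    aGet? l p.1 = some p.2 := by
  simp [aGet?, find?_of_nodup_keys l p hnd hp]

theorem aGet?_eq_none (l : List (String × Int)) (k : String)
    (h : k ∉ l.map (fun q => q.1)) : aGet? l k = none := by
  simp only [aGet?, Option.map_eq_none_iff, List.find?_eq_none]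
  intro p hp
  simp only [beq_iff_eq]
  intro hk
  exact h (hk ▸ List.mem_map_of_mem hp)

theorem constant_meet_spec : Claim_equal_constant_meet := by
  intro lists _hdom hpre
  unfold Spec_constant_meet
  match lists with
  | [] => rfl
  | first :: rest =>
    have hK : (first.map (fun p => p.1)).Nodup := hpre first (List.mem_cons_self ..)
    -- name the pieces
    set f : List (String × Int) → String → Bool := fun x var =>
      (match aGet? x var with
       | none => false
       | some v => v == (aGet? ((first :: rest).headD []) var).getD 0) with hf
    have hport : constant_meet (first :: rest)
        = ((first :: rest).foldl
            (fun vs x => PySem.Set.union vs (PySem.Set.ofList (x.map (fun p => p.1)))) PySem.Set.empty).foldl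
            (fun ans var => if (first :: rest).all (fun x => f x var)
              then ans ++ [(var, (aGet? ((first :: rest).headD []) var).getD 0)] else ans) [] := rfl
    rw [hport, foldl_union_eq_update, PySem.List.foldl_append_if, List.nil_append]
    -- the collected vars: keys of `first`, then the extra keys of the rest
    rw [List.flatMap_cons, show PySem.Set.update PySem.Set.empty
          (first.map (fun p => p.1) ++ (rest.flatMap (fun x => x.map (fun p => p.1))))
        = PySem.Set.update (PySem.Set.ofList (first.map (fun p => p.1)))
            (rest.flatMap (fun x => x.map (fun p => p.1))) from by
        rw [PySem.Set.update_append, PySem.Set.update_empty],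
      PySem.Set.update_eq_append_filter, PySem.Set.ofList_eq_self_of_nodup _ hK,
      List.filter_append]
    -- extra keys are absent from `first`, so they never meet
    have hextra : ((PySem.Set.ofList (rest.flatMap (fun x => x.map (fun p => p.1)))).filter
        (fun y => !(PySem.Set.contains (first.map (fun p => p.1)) y))).filter
          (fun var => (first :: rest).all (fun x => f x var)) = [] := by
      rw [List.filter_filter, List.filter_eq_nil_iff]
      intro y hy
      by_cases hmem : y ∈ first.map (fun p => p.1)
      · simp
        intro _ _
        obtain ⟨p, hp, hpy⟩ := List.mem_map.mp hmem
        exact ⟨p.2, by rw [← hpy]; simpa using hp⟩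
      · have : f first y = false := by
          rw [hf]; simp only [aGet?_eq_none first y hmem]
        simp [List.all_cons, this]
    rw [hextra, List.append_nil]
    -- restrict to the first dict's own items
    rw [List.filter_map, List.map_map]
    simp only [Function.comp_def]
    have hfil : first.filter (fun p => (first :: rest).all (fun x => f x p.1))
        = first.filter (fun p => rest.all (fun x => aGet? x p.1 == some p.2)) := by
      apply List.filter_congr
      intro p hp
      have hg : aGet? first p.1 = some p.2 := aGet?_of_nodup first p hK hp
      have hfirst : f first p.1 = true := by rw [hf]; simp [hg]
      have hx : ∀ x, f x p.1 = (aGet? x p.1 == some p.2) := by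
        intro x
        rw [hf]
        simp only [List.headD_cons, hg, Option.getD_some]
        cases aGet? x p.1 <;> simp
      simp only [List.all_cons, hfirst, Bool.true_and]
      exact congrArg _ (funext hx)
    rw [hfil]
    have hmap : (first.filter (fun p => rest.all (fun x => aGet? x p.1 == some p.2))).map
        (fun p => (p.1, (aGet? ((first :: rest).headD []) p.1).getD 0))
        = first.filter (fun p => rest.all (fun x => aGet? x p.1 == some p.2)) := by
      conv_rhs => rw [← List.map_id (first.filter _)]
      apply List.map_congr_left
      intro p hp
      have hg : aGet? first p.1 = some p.2 :=
        aGet?_of_nodup first p hK (List.mem_of_mem_filter hp)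
      simp [hg]
    rw [hmap]
    rfl
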